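-- pv_equiv track=rewrite | github.com/trentw/script-to-speech | src/script_to_speech/utils/dialogue_stats_utils.py | analyze_speaker_lines
-- ===== SOURCE A (Python) =====
-- from collections import Counter
-- from typing import Dict, List, NamedTuple, TypedDict
--
-- def analyze_speaker_lines(dialogues: List[Dict]) -> Dict[str, int]:
--     """
--     Analyze list of dialogue chunks to count speaker lines.
--     'default' speaker is used for chunks with no speaker attribute.
--     Returns counts with 'default' first, followed by other speakers sorted by frequency.
--
--     Args:
--         dialogues: List of dialogue chunks
--
--     Returns:
--         Dict[str, int]: Ordered dict with speaker names as keys and line counts as values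
--     """
--     counts: Counter[str] = Counter()
--     default_count = 0
--
--     for dialogue in dialogues:
--         if dialogue["type"] == "dialogue":
--             speaker = dialogue.get("speaker")
--             if speaker:
--                 counts[speaker] += 1
--             else:
--                 default_count += 1
--         else:
--             # Non-dialogue chunks use default speaker
--             default_count += 1
--
--     # Create ordered dict with default first
--     result = {"default": default_count}
--
--     # Add other speakers sorted by count (descending) then name
--     for speaker, count in sorted(counts.items(), key=lambda x: (-x[1], x[0])):
--         result[speaker] = count
--
--     return result
-- ===== SOURCE B (Python) =====
-- from typing import Dict, List
--
--
-- def analyze_speaker_lines(dialogues: List[Dict]) -> Dict[str, int]: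
--     # Sort the spoken names, run-length encode them, then emit buckets of equal
--     # count from the largest count down (a counting-sort on the run lengths).
--     names = sorted(d["speaker"] for d in dialogues
--                    if d["type"] == "dialogue" and d.get("speaker"))
--
--     # run-length encode: one (speaker, count) per distinct speaker, names ascending
--     runs = []
--     i = 0
--     while i < len(names):
--         j = i + 1
--         while j < len(names) and names[j] == names[i]:
--             j += 1
--         runs.append((names[i], j - i))
--         i = j
--
--     # bucket the runs by count, remembering the largest count
--     buckets = {}
--     maxc = 0
--     for name, c in runs:
--         buckets[c] = buckets.get(c, []) + [name]
--         maxc = max(maxc, c)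
--
--     result = {"default": len(dialogues) - len(names)}
--     for c in reversed(range(1, maxc + 1)):
--         for name in buckets.get(c, []):
--             result[name] = c
--     return result
-- ===== Notes on version B (the rewrite author's own statement) =====
-- stated objective: alternative
-- what changed: Replaces A's Counter + tuple-key comparison sort by a different pipeline: sort the spoken names, run-length encode the sorted list into (speaker, count) runs, then bucket the runs by count and emit the buckets from the largest count down (a counting sort on the run lengths); the default count is obtained by subtraction instead of a branchy accumulator.
import Mathlib
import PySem

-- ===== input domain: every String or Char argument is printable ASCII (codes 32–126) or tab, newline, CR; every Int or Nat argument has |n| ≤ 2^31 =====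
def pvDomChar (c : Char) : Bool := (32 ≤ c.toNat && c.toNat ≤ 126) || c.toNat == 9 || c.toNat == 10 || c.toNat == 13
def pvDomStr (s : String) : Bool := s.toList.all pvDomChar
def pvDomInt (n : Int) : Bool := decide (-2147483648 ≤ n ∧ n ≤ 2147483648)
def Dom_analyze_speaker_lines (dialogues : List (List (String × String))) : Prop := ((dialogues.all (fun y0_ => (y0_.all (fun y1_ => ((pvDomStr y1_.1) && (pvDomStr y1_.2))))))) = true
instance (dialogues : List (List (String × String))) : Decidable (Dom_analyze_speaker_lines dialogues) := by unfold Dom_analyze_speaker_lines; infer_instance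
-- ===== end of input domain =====

-- B replaces A's Counter + tuple-key comparison sort by: sort the spoken names, run-length
-- encode the sorted list into (speaker, count) runs, then bucket the runs by count and emit
-- the buckets from the largest count down (a counting sort on run lengths). Same return value
-- wherever A returns; objective: alternative algorithm, similar cost.

-- ===== PORT A =====
-- the body of A's 'for dialogue in dialogues' loop, acting on the state (counts, default_count);
-- the 'none' branch of the "type" lookup is where Python raises KeyError (excluded by Pre_).
def aStep (st : PySem.Dict String Int × Int) (dialogue : List (String × String)) :
    PySem.Dict String Int × Int :=
  match (PySem.Dict.mk dialogue).get? "type" with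
  | some t =>
    if t = "dialogue" then
      match (PySem.Dict.mk dialogue).get? "speaker" with
      | some s => if s ≠ "" then (st.1.modify s 0 (· + 1), st.2) else (st.1, st.2 + 1)
      | none => (st.1, st.2 + 1)
    else (st.1, st.2 + 1)
  | none => st  -- KeyError in Python; unreachable under Pre_

def analyze_speaker_lines (dialogues : List (List (String × String))) : List (String × Int) :=
  let st := dialogues.foldl aStep (PySem.Dict.empty, 0)
  let result := PySem.Dict.empty.insert "default" st.2
  ((PySem.List.sorted2 st.1.items (fun x => -x.2) (fun x => x.1)).foldl
      (fun r p => r.insert p.1 p.2) result).items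

-- ===== PORT B =====
-- the generator's filter: some speaker iff the chunk is a dialogue with a truthy speaker
def spokenName (dialogue : List (String × String)) : Option String :=
  match (PySem.Dict.mk dialogue).get? "type" with
  | some t =>
    if t = "dialogue" then
      match (PySem.Dict.mk dialogue).get? "speaker" with
      | some s => if s ≠ "" then some s else none
      | none => none
    else none
  | none => none  -- KeyError in Python; unreachable under Pre_

-- Source B's index/while run-length encoder: the inner 'while' advances j over the names equal to
-- names[i] (= takeWhile), appends (names[i], j - i) and restarts at i = j (= dropWhile).
def rle (names : List String) : List (String × Int) :=
  match names with
  | [] => []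
  | x :: xs =>
    (x, 1 + ((xs.takeWhile (fun y => y == x)).length : Int)) ::
      rle (xs.dropWhile (fun y => y == x))
termination_by names.length
decreasing_by
  simpa using Nat.lt_succ_of_le (List.length_dropWhile_le _ _)

def analyze_speaker_lines_alt (dialogues : List (List (String × String))) : List (String × Int) :=
  let spoken := dialogues.filterMap spokenName
  let names := PySem.List.sorted spoken (fun x => x)
  let runs := rle names
  let st := runs.foldl
      (fun (p : PySem.Dict Int (List String) × Int) r =>
        (p.1.modify r.2 [] (· ++ [r.1]), max p.2 r.2))
      (PySem.Dict.empty, 0)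
  let result := PySem.Dict.empty.insert "default"
      ((dialogues.length : Int) - (names.length : Int))
  ((PySem.List.pyRange 1 (st.2 + 1)).reverse.foldl
      (fun res c => (st.1.getD c []).foldl (fun res n => res.insert n c) res) result).items

-- ===== PRECONDITION & SPEC =====
-- Pre_ excludes exactly the inputs where Python A raises KeyError: a chunk with no "type" key.
def Pre_analyze_speaker_lines (dialogues : List (List (String × String))) : Prop :=
  ∀ dl ∈ dialogues, ((PySem.Dict.mk dl).get? "type").isSome = true

instance (dialogues : List (List (String × String))) : Decidable (Pre_analyze_speaker_lines dialogues) := by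
  unfold Pre_analyze_speaker_lines; infer_instance

def pvWitness_analyze_speaker_lines : (List (List (String × String))) :=
  [[("type", "dialogue"), ("speaker", "ALICE")], [("type", "action")],
   [("type", "dialogue"), ("speaker", "")], [("type", "dialogue"), ("speaker", "ALICE")]]

def Spec_analyze_speaker_lines (dialogues : List (List (String × String))) (out : List (String × Int)) : Prop := out = analyze_speaker_lines_alt dialogues
instance (dialogues : List (List (String × String))) (out : List (String × Int)) : Decidable (Spec_analyze_speaker_lines dialogues out) := by unfold Spec_analyze_speaker_lines; infer_instance

-- ===== CLAIM (what is proved, stated in full; the proofs are below) =====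
def Claim_equal_analyze_speaker_lines : Prop := ∀ (dialogues : List (List (String × String))), Dom_analyze_speaker_lines dialogues → Pre_analyze_speaker_lines dialogues → Spec_analyze_speaker_lines dialogues (analyze_speaker_lines dialogues)

-- ===== LEMMAS AND PROOFS =====

-- the Python-tuple sort key of A, as one lexicographic linear-order key
def lexKey (p : String × Int) : Int ×ₗ String := toLex (-p.2, p.1)

lemma sorted2_eq_sorted_lex (xs : List (String × Int)) :
    PySem.List.sorted2 xs (fun x => -x.2) (fun x => x.1) =
      PySem.List.sorted xs lexKey := by
  show xs.foldl (fun acc x => PySem.List.insertBy _ x acc) [] =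
       xs.foldl (fun acc x => PySem.List.insertBy _ x acc) []
  have hbef : (fun (a b : String × Int) =>
        decide (-a.2 < -b.2) || (!decide (-b.2 < -a.2) && decide (a.1 < b.1))) =
      (fun a b => decide (lexKey a < lexKey b)) := by
    funext a b
    by_cases h1 : (-a.2 : Int) < -b.2
    · simp [lexKey, Prod.Lex.lt_iff, h1]
    · by_cases h2 : (-b.2 : Int) < -a.2
      · simp [lexKey, Prod.Lex.lt_iff, h1, h2, ne_of_gt h2]
      · have heq : (-a.2 : Int) = -b.2 := le_antisymm (not_lt.1 h2) (not_lt.1 h1)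
        simp [lexKey, Prod.Lex.lt_iff, heq]
  rw [hbef]

-- A's counting loop equals (Counter over the extracted spoken names, default by subtraction).
lemma loop_eq (l : List (List (String × String))) (d : PySem.Dict String Int) (k : Int)
    (hpre : ∀ dl ∈ l, ((PySem.Dict.mk dl).get? "type").isSome = true) :
    l.foldl aStep (d, k) =
      ((l.filterMap spokenName).foldl (fun d x => d.modify x 0 (· + 1)) d,
       k + (l.length : Int) - ((l.filterMap spokenName).length : Int)) := by
  induction l generalizing d k with
  | nil => simp
  | cons x xs ih =>
    have hx : ((PySem.Dict.mk x).get? "type").isSome = true := hpre x (by simp)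
    have hxs : ∀ dl ∈ xs, ((PySem.Dict.mk dl).get? "type").isSome = true :=
      fun dl h => hpre dl (by simp [h])
    obtain ⟨t, ht⟩ := Option.isSome_iff_exists.mp hx
    have ha : ∀ st : PySem.Dict String Int × Int, aStep st x =
        (match spokenName x with
         | none => (st.1, st.2 + 1)
         | some s => (st.1.modify s 0 (· + 1), st.2)) := by
      intro st
      by_cases hdlg : t = "dialogue"
      · cases hs : (PySem.Dict.mk x).get? "speaker" with
        | some s =>
          by_cases hne : s = "" <;> simp [aStep, spokenName, ht, hdlg, hs, hne]
        | none => simp [aStep, spokenName, ht, hdlg, hs]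
      · simp [aStep, spokenName, ht, hdlg]
    cases hsp : spokenName x with
    | none =>
      rw [List.foldl_cons, ha, hsp]
      simp only [List.filterMap_cons, hsp]
      rw [ih _ _ hxs]
      refine Prod.ext rfl ?_
      simp only [List.length_cons]
      push_cast; ring
    | some s =>
      rw [List.foldl_cons, ha, hsp]
      simp only [List.filterMap_cons, hsp]
      rw [ih _ _ hxs]
      refine Prod.ext rfl ?_
      simp only [List.length_cons]
      push_cast; ring

-- the run-length encoding of a ≤-sorted list: counts are multiplicities, names strictly ascend
lemma rle_spec (l : List String) (h : l.Pairwise (· ≤ ·)) :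
    (∀ p ∈ rle l, p.2 = (l.count p.1 : Int) ∧ 1 ≤ p.2 ∧ p.1 ∈ l) ∧
      (rle l).Pairwise (fun p q => p.1 < q.1) ∧
      (∀ k, k ∈ l → ∃ c, (k, c) ∈ rle l) := by
  induction l using rle.induct with
  | case1 => simp [rle]
  | case2 x xs ih =>
    set t := xs.takeWhile (fun y => y == x) with hT
    set d := xs.dropWhile (fun y => y == x) with hD
    have hxs : xs = t ++ d := (List.takeWhile_append_dropWhile).symm
    have hxle : ∀ y ∈ xs, x ≤ y := fun y hy => List.rel_of_pairwise_cons h hy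
    have hpxs : xs.Pairwise (· ≤ ·) := List.pairwise_cons.mp h |>.2
    have hpd : d.Pairwise (· ≤ ·) := List.Pairwise.sublist (List.dropWhile_sublist _) hpxs
    have ht : ∀ y ∈ t, y = x := by
      intro y hy
      have := List.mem_takeWhile_imp hy
      simpa using this
    have hd : ∀ y ∈ d, x < y := by
      cases hDc : d with
      | nil => simp
      | cons hdh hdt =>
        have hhead : (fun y => y == x) hdh = false := by
          have := List.head?_dropWhile_not (fun y => y == x) xs
          rw [← hD, hDc] at this
          simpa using this
        have hne : hdh ≠ x := by simpa using hhead
        have hmem : hdh ∈ xs := by rw [hxs, hDc]; simp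
        have hlt : x < hdh := lt_of_le_of_ne (hxle _ hmem) (Ne.symm hne)
        intro y hy
        rcases List.mem_cons.mp hy with rfl | hy'
        · exact hlt
        · have := List.rel_of_pairwise_cons (hDc ▸ hpd) hy'
          exact lt_of_lt_of_le hlt this
    have hcountx : (x :: xs).count x = 1 + t.length := by
      have hct : t.count x = t.length := List.count_eq_length.mpr (fun b hb => (ht b hb).symm)
      have hcd : d.count x = 0 := List.count_eq_zero.mpr (fun hx => absurd (hd x hx) (lt_irrefl x))
      rw [List.count_cons_self, hxs, List.count_append, hct, hcd]
      omega
    obtain ⟨ih1, ih2, ih3⟩ := ih hpd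
    have hmemd : ∀ p ∈ rle d, p.1 ∈ d := fun p hp => (ih1 p hp).2.2
    refine ⟨?_, ?_, ?_⟩
    · intro p hp
      rw [rle] at hp
      rcases List.mem_cons.mp hp with rfl | hp'
      · refine ⟨?_, by have : (0:Int) ≤ (t.length : Int) := Int.natCast_nonneg _; omega, by simp⟩
        simp only [← hT, hcountx]
        push_cast; ring
      · obtain ⟨h1, h2, h3⟩ := ih1 p hp'
        have hgt : x < p.1 := hd _ h3
        have hcx : (x :: xs).count p.1 = d.count p.1 := by
          have h0 : t.count p.1 = 0 := List.count_eq_zero.mpr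
            (fun hmem => absurd (ht _ hmem) (by intro he; exact absurd (he ▸ hgt) (lt_irrefl _)))
          rw [List.count_cons_of_ne (by intro he; exact absurd (he ▸ hgt) (lt_irrefl _)) , hxs,
            List.count_append, h0]
          omega
        exact ⟨by rw [hcx, ← h1], h2, by rw [hxs]; simp [h3]⟩
    · rw [rle]
      refine List.Pairwise.cons ?_ ih2
      intro q hq
      exact hd _ (hmemd q hq)
    · intro k hk
      rcases List.mem_cons.mp hk with rfl | hk'
      · exact ⟨_, by rw [rle]; exact List.mem_cons_self ..⟩
      · rcases (List.mem_append.mp (hxs ▸ hk')) with hkt | hkd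
        · exact ⟨_, by rw [rle, ht k hkt]; exact List.mem_cons_self ..⟩
        · obtain ⟨c, hc⟩ := ih3 k hkd
          exact ⟨c, by rw [rle]; exact List.mem_cons_of_mem _ hc⟩

-- distributing a list over the distinct values of a key and concatenating is a permutation
lemma flatMap_filter_perm {α : Type} (key : α → Int) (cs : List Int) (l : List α)
    (hnd : cs.Nodup) (hcov : ∀ r ∈ l, key r ∈ cs) :
    (cs.flatMap (fun c => l.filter (fun r => key r == c))).Perm l := by
  induction cs generalizing l with
  | nil =>
    cases l with
    | nil => simp
    | cons x xs => exact absurd (hcov x (by simp)) (by simp)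
  | cons c cs ih =>
    rw [List.flatMap_cons]
    have hcne : ∀ c' ∈ cs, c' ≠ c := by
      intro c' hc' he; exact (List.nodup_cons.mp hnd).1 (he ▸ hc')
    have hrest : cs.flatMap (fun c' => l.filter (fun r => key r == c')) =
        cs.flatMap (fun c' => (l.filter (fun r => !(key r == c))).filter (fun r => key r == c')) := by
      refine List.flatMap_congr ?_
      intro c' hc'
      rw [List.filter_filter]
      refine (List.filter_congr ?_).symm
      intro x _
      by_cases hx : key x = c'
      · have : key x ≠ c := fun he => hcne c' hc' (by rw [← hx, he])
        simp [hx, hcne c' hc']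
      · simp [hx]
    rw [hrest]
    have hperm2 := ih (l.filter (fun r => !(key r == c)))
      (List.nodup_cons.mp hnd).2
      (by
        intro r hr
        have h1 := List.mem_filter.mp hr
        have h2 := hcov r h1.1
        have h3 : key r ≠ c := by simpa using h1.2
        simpa [h3] using h2)
    exact (List.Perm.append_left _ hperm2).trans (List.filter_append_perm _ l)

lemma pyRange_one_pairwise_lt (a b : Int) : (PySem.List.pyRange a b).Pairwise (· < ·) := by
  by_cases hab : a < b
  · rw [PySem.List.pyRange_one_cons hab]
    refine List.Pairwise.cons ?_ (pyRange_one_pairwise_lt (a + 1) b)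
    intro y hy
    have := (PySem.List.mem_pyRange_one.mp hy).1
    omega
  · have hnil : PySem.List.pyRange a b = [] := by
      rw [List.eq_nil_iff_forall_not_mem]
      intro x hx
      have := PySem.List.mem_pyRange_one.mp hx
      omega
    simp [hnil]
termination_by (b - a).toNat
decreasing_by omega

lemma nested_emit (cs : List Int) (bucket : Int → List String) (base : PySem.Dict String Int) :
    cs.foldl (fun res c => (bucket c).foldl (fun res n => res.insert n c) res) base =
    (cs.flatMap (fun c => (bucket c).map (fun n => (n, c)))).foldl
      (fun res p => res.insert p.1 p.2) base := by
  simp [List.foldl_flatMap, List.foldl_map]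

lemma bucket_eq (runs : List (String × Int)) (c : Int) :
    (runs.foldl (fun d r => d.modify r.2 [] (· ++ [r.1])) PySem.Dict.empty).getD c [] =
    (runs.filter (fun r => r.2 == c)).map (·.1) := by
  have h1 : runs.foldl (fun d r => d.modify r.2 [] (· ++ [r.1])) PySem.Dict.empty
      = (runs.map (fun r => (r.2, r.1))).foldl
          (fun d p => d.modify p.1 [] (· ++ [p.2])) PySem.Dict.empty := by
    rw [List.foldl_map]
  rw [h1, PySem.Dict.getD_foldl_modify_append]
  simp [List.filter_map, Function.comp_def]

lemma main_eq :
    ∀ (dialogues : List (List (String × String))),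
      Pre_analyze_speaker_lines dialogues →
      analyze_speaker_lines dialogues = analyze_speaker_lines_alt dialogues := by
  intro dialogues hpre
  unfold analyze_speaker_lines analyze_speaker_lines_alt
  rw [loop_eq dialogues PySem.Dict.empty 0 hpre]
  simp only [← PySem.Dict.counter_eq_foldl, zero_add]
  set spoken := dialogues.filterMap spokenName with hspoken
  set names := PySem.List.sorted spoken (fun x => x) with hnames
  set runs := rle names with hruns
  have hsplit := PySem.List.foldl_prod_mk
      (fun (d : PySem.Dict Int (List String)) (r : String × Int) => d.modify r.2 [] (fun x => x ++ [r.1]))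
      (fun (m : Int) (r : String × Int) => max m r.2) (rle (PySem.List.sorted (dialogues.filterMap spokenName) (fun x => x))) PySem.Dict.empty 0
  rw [hsplit]
  set maxc := runs.foldl (fun m r => max m r.2) 0 with hmaxc
  set cs := (PySem.List.pyRange 1 (maxc + 1)).reverse with hcs
  rw [nested_emit]
  -- facts about runs
  have hnames_pw : names.Pairwise (· ≤ ·) := by
    simpa using PySem.List.sorted_pairwise spoken (fun x => x)
  obtain ⟨hs1, hs2, hs3⟩ := rle_spec names hnames_pw
  have hcnt : ∀ k, names.count k = spoken.count k :=
    fun k => (PySem.List.sorted_perm spoken (fun x => x) false).count_eq k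
  -- blocks
  have hblock : ∀ c : Int,
      (((runs.foldl (fun d r => d.modify r.2 [] (fun x => x ++ [r.1]))
          PySem.Dict.empty).getD c []).map (fun n => (n, c)))
        = runs.filter (fun r => r.2 == c) := by
    intro c
    rw [bucket_eq, List.map_map]
    have : ∀ r ∈ runs.filter (fun r => r.2 == c),
        ((fun n => (n, c)) ∘ (fun r : String × Int => r.1)) r = id r := by
      intro r hr
      have : r.2 = c := by simpa using (List.mem_filter.mp hr).2
      simp [Function.comp, ← this]
    rw [List.map_congr_left this, List.map_id]
  have hE : cs.flatMap (fun c =>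
        (((runs.foldl (fun d r => d.modify r.2 [] (fun x => x ++ [r.1]))
            PySem.Dict.empty).getD c []).map (fun n => (n, c))))
      = cs.flatMap (fun c => runs.filter (fun r => r.2 == c)) := by
    exact List.flatMap_congr (fun c _ => hblock c)
  rw [hE]
  set E := cs.flatMap (fun c => runs.filter (fun r => r.2 == c)) with hEdef
  -- cs facts
  have hcs_pw : cs.Pairwise (· > ·) :=
    List.pairwise_reverse.mpr (pyRange_one_pairwise_lt 1 (maxc + 1))
  have hcs_nodup : cs.Nodup := hcs_pw.imp (fun h => ne_of_gt h)
  have hcov : ∀ r ∈ runs, r.2 ∈ cs := by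
    intro r hr
    obtain ⟨-, h1, -⟩ := hs1 r hr
    have h2 := (PySem.List.le_foldl_max_int runs (fun r => r.2) 0).2 r hr
    rw [hcs, List.mem_reverse, PySem.List.mem_pyRange_one]
    omega
  -- E is a permutation of runs, hence of the counter's items
  have hEperm_runs : E.Perm runs := flatMap_filter_perm (fun r => r.2) cs runs hcs_nodup hcov
  have hfst_nodup : (runs.map (fun r => r.1)).Nodup :=
    List.pairwise_map.mpr (hs2.imp (fun h => ne_of_lt h))
  have hperm_fst : (runs.map (fun r => r.1)).Perm (PySem.Set.ofList spoken) := by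
    refine List.perm_of_nodup_nodup_toFinset_eq hfst_nodup (PySem.Set.nodup_ofList spoken) ?_
    ext k
    simp only [List.mem_toFinset, List.mem_map, PySem.Set.mem_ofList]
    constructor
    · rintro ⟨p, hp, rfl⟩
      exact (PySem.List.mem_sorted spoken (fun x => x) false p.1).mp (hs1 p hp).2.2
    · intro hk
      obtain ⟨c, hc⟩ := hs3 k ((PySem.List.mem_sorted spoken (fun x => x) false k).mpr hk)
      exact ⟨(k, c), hc, rfl⟩
  have hruns_eq : runs.map (fun k => (k.1, (spoken.count k.1 : Int))) = runs := by
    have : ∀ r ∈ runs, (r.1, (spoken.count r.1 : Int)) = id r := by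
      intro r hr
      obtain ⟨h1, -, -⟩ := hs1 r hr
      rw [hcnt] at h1
      exact Prod.ext rfl h1.symm
    rw [List.map_congr_left this, List.map_id]
  have hperm_items : E.Perm ((PySem.Dict.counter spoken).items) := by
    rw [PySem.Dict.items_counter]
    refine hEperm_runs.trans ?_
    have := hperm_fst.map (fun k => (k, (spoken.count k : Int)))
    rw [List.map_map] at this
    simpa [Function.comp_def, hruns_eq] using this
  -- E is strictly decreasing in count, then strictly increasing in name
  have hEpw : E.Pairwise (fun a b => lexKey a < lexKey b) := by
    rw [hEdef, List.flatMap_def, List.pairwise_flatten]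
    constructor
    · intro l hl
      obtain ⟨c, -, rfl⟩ := List.mem_map.mp hl
      rw [List.pairwise_filter]
      refine hs2.imp_of_mem ?_
      intro p q hp hq h hpc hqc
      refine Prod.Lex.lt_iff.mpr (Or.inr ⟨?_, h⟩)
      have h1 : p.2 = c := by simpa using hpc
      have h2 : q.2 = c := by simpa using hqc
      simp [lexKey, h1, h2]
    · rw [List.pairwise_map]
      refine hcs_pw.imp_of_mem ?_
      intro c c' _ _ hgt x hx y hy
      have h1 : x.2 = c := by simpa using (List.mem_filter.mp hx).2
      have h2 : y.2 = c' := by simpa using (List.mem_filter.mp hy).2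
      refine Prod.Lex.lt_iff.mpr (Or.inl ?_)
      simp [lexKey, h1, h2]
      omega
  -- A's sorted list is exactly E
  rw [sorted2_eq_sorted_lex,
    PySem.List.sorted_eq_of_perm_of_pairwise_lt _ E lexKey hperm_items hEpw]
  simp only [hnames, PySem.List.length_sorted]

-- ===== VERDICT (by name: the statement is the Claim_ definition above) =====
theorem analyze_speaker_lines_spec : Claim_equal_analyze_speaker_lines := by
  intro dialogues _ hpre
  exact main_eq dialogues hpre
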